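-- pv_equiv track=rewrite | github.com/visheratin/mc-llava | processing_mc_llava.py | round_num_crops
-- ===== SOURCE A (Python) =====
-- def round_num_crops(n_crops: int):
--     highly_composite_numbers = [
--         1,
--         2,
--         4,
--         6,
--         12,
--         24,
--         36,
--         48,
--         60,
--         120,
--         180,
--         240,
--     ]
--     for i in range(len(highly_composite_numbers) - 1, -1, -1):
--         if highly_composite_numbers[i] <= n_crops:
--             return highly_composite_numbers[i]
-- ===== SOURCE B (Python) =====
-- import bisect
--
-- def round_num_crops(n_crops: int):
--     highly_composite_numbers = [1, 2, 4, 6, 12, 24, 36, 48, 60, 120, 180, 240]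
--     idx = bisect.bisect_right(highly_composite_numbers, n_crops)
--     return highly_composite_numbers[idx - 1] if idx > 0 else None
-- ===== Notes on version B (the rewrite author's own statement) =====
-- stated objective: idiomatic
-- what changed: Replaces the backward linear scan with early return by bisect.bisect_right on the sorted fixed list, indexing one position left of the insertion point (None when idx == 0).
import Mathlib
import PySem

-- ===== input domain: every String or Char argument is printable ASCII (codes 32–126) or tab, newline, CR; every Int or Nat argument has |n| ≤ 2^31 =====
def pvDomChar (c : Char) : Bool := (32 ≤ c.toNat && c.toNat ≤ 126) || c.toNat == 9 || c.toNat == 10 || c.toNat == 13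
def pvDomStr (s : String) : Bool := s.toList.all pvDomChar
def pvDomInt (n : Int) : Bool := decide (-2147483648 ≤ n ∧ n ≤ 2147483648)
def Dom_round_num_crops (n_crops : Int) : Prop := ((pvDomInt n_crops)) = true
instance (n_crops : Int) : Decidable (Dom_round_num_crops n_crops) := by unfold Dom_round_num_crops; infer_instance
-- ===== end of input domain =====

-- B replaces A's backward linear scan with a bisect_right binary search on the same fixed sorted list (idiomatic, not faster).


-- ===== PORT A =====
-- A scans the list from the last index down to 0 and returns the first element ≤ n_crops;
-- if the loop finishes, Python returns None.
def pvHCN : List Int := [1, 2, 4, 6, 12, 24, 36, 48, 60, 120, 180, 240]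

def round_num_crops (n_crops : Int) : Option Int :=
  pvHCN.reverse.find? (fun v => v ≤ n_crops)

-- ===== PORT B =====
-- bisect.bisect_right: binary search for the insertion point keeping n_crops left of equals.
def pvBisectRight (a : List Int) (x : Int) (lo hi : Nat) : Nat :=
  if lo < hi then
    let mid := (lo + hi) / 2
    if x < a.getD mid 0 then pvBisectRight a x lo mid
    else pvBisectRight a x (mid + 1) hi
  else lo
termination_by hi - lo
decreasing_by all_goals omega

def round_num_crops_alt (n_crops : Int) : Option Int :=
  let idx := pvBisectRight pvHCN n_crops 0 pvHCN.length
  if idx > 0 then some (pvHCN.getD (idx - 1) 0) else none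

-- ===== PRECONDITION & SPEC =====
def Spec_round_num_crops (n_crops : Int) (out : Option Int) : Prop := out = round_num_crops_alt n_crops
instance (n_crops : Int) (out : Option Int) : Decidable (Spec_round_num_crops n_crops out) := by unfold Spec_round_num_crops; infer_instance

-- ===== CLAIM (what is proved, stated in full; the proofs are below) =====
def Claim_equal_round_num_crops : Prop := ∀ (n_crops : Int), Dom_round_num_crops n_crops → Spec_round_num_crops n_crops (round_num_crops n_crops)

-- ===== LEMMAS AND PROOFS =====

-- ===== VERDICT (by name: the statement is the Claim_ definition above) =====
set_option maxRecDepth 8000 in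
theorem round_num_crops_spec : Claim_equal_round_num_crops := by
  intro n _
  unfold Spec_round_num_crops round_num_crops round_num_crops_alt
  by_cases h1 : n < 1
  · simp [pvBisectRight, pvHCN, List.find?, show n < (1:Int) by omega, show ¬ (1:Int) ≤ n by omega, show n < (2:Int) by omega, show ¬ (2:Int) ≤ n by omega, show n < (4:Int) by omega, show ¬ (4:Int) ≤ n by omega, show n < (6:Int) by omega, show ¬ (6:Int) ≤ n by omega, show n < (12:Int) by omega, show ¬ (12:Int) ≤ n by omega, show n < (24:Int) by omega, show ¬ (24:Int) ≤ n by omega, show n < (36:Int) by omega, show ¬ (36:Int) ≤ n by omega, show n < (48:Int) by omega, show ¬ (48:Int) ≤ n by omega, show n < (60:Int) by omega, show ¬ (60:Int) ≤ n by omega, show n < (120:Int) by omega, show ¬ (120:Int) ≤ n by omega, show n < (180:Int) by omega, show ¬ (180:Int) ≤ n by omega, show n < (240:Int) by omega, show ¬ (240:Int) ≤ n by omega]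
  by_cases h2 : n < 2
  · simp [pvBisectRight, pvHCN, List.find?, show ¬ n < (1:Int) by omega, show (1:Int) ≤ n by omega, show n < (2:Int) by omega, show ¬ (2:Int) ≤ n by omega, show n < (4:Int) by omega, show ¬ (4:Int) ≤ n by omega, show n < (6:Int) by omega, show ¬ (6:Int) ≤ n by omega, show n < (12:Int) by omega, show ¬ (12:Int) ≤ n by omega, show n < (24:Int) by omega, show ¬ (24:Int) ≤ n by omega, show n < (36:Int) by omega, show ¬ (36:Int) ≤ n by omega, show n < (48:Int) by omega, show ¬ (48:Int) ≤ n by omega, show n < (60:Int) by omega, show ¬ (60:Int) ≤ n by omega, show n < (120:Int) by omega, show ¬ (120:Int) ≤ n by omega, show n < (180:Int) by omega, show ¬ (180:Int) ≤ n by omega, show n < (240:Int) by omega, show ¬ (240:Int) ≤ n by omega]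
  by_cases h4 : n < 4
  · simp [pvBisectRight, pvHCN, List.find?, show ¬ n < (1:Int) by omega, show (1:Int) ≤ n by omega, show ¬ n < (2:Int) by omega, show (2:Int) ≤ n by omega, show n < (4:Int) by omega, show ¬ (4:Int) ≤ n by omega, show n < (6:Int) by omega, show ¬ (6:Int) ≤ n by omega, show n < (12:Int) by omega, show ¬ (12:Int) ≤ n by omega, show n < (24:Int) by omega, show ¬ (24:Int) ≤ n by omega, show n < (36:Int) by omega, show ¬ (36:Int) ≤ n by omega, show n < (48:Int) by omega, show ¬ (48:Int) ≤ n by omega, show n < (60:Int) by omega, show ¬ (60:Int) ≤ n by omega, show n < (120:Int) by omega, show ¬ (120:Int) ≤ n by omega, show n < (180:Int) by omega, show ¬ (180:Int) ≤ n by omega, show n < (240:Int) by omega, show ¬ (240:Int) ≤ n by omega]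
  by_cases h6 : n < 6
  · simp [pvBisectRight, pvHCN, List.find?, show ¬ n < (1:Int) by omega, show (1:Int) ≤ n by omega, show ¬ n < (2:Int) by omega, show (2:Int) ≤ n by omega, show ¬ n < (4:Int) by omega, show (4:Int) ≤ n by omega, show n < (6:Int) by omega, show ¬ (6:Int) ≤ n by omega, show n < (12:Int) by omega, show ¬ (12:Int) ≤ n by omega, show n < (24:Int) by omega, show ¬ (24:Int) ≤ n by omega, show n < (36:Int) by omega, show ¬ (36:Int) ≤ n by omega, show n < (48:Int) by omega, show ¬ (48:Int) ≤ n by omega, show n < (60:Int) by omega, show ¬ (60:Int) ≤ n by omega, show n < (120:Int) by omega, show ¬ (120:Int) ≤ n by omega, show n < (180:Int) by omega, show ¬ (180:Int) ≤ n by omega, show n < (240:Int) by omega, show ¬ (240:Int) ≤ n by omega]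
  by_cases h12 : n < 12
  · simp [pvBisectRight, pvHCN, List.find?, show ¬ n < (1:Int) by omega, show (1:Int) ≤ n by omega, show ¬ n < (2:Int) by omega, show (2:Int) ≤ n by omega, show ¬ n < (4:Int) by omega, show (4:Int) ≤ n by omega, show ¬ n < (6:Int) by omega, show (6:Int) ≤ n by omega, show n < (12:Int) by omega, show ¬ (12:Int) ≤ n by omega, show n < (24:Int) by omega, show ¬ (24:Int) ≤ n by omega, show n < (36:Int) by omega, show ¬ (36:Int) ≤ n by omega, show n < (48:Int) by omega, show ¬ (48:Int) ≤ n by omega, show n < (60:Int) by omega, show ¬ (60:Int) ≤ n by omega, show n < (120:Int) by omega, show ¬ (120:Int) ≤ n by omega, show n < (180:Int) by omega, show ¬ (180:Int) ≤ n by omega, show n < (240:Int) by omega, show ¬ (240:Int) ≤ n by omega]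
  by_cases h24 : n < 24
  · simp [pvBisectRight, pvHCN, List.find?, show ¬ n < (1:Int) by omega, show (1:Int) ≤ n by omega, show ¬ n < (2:Int) by omega, show (2:Int) ≤ n by omega, show ¬ n < (4:Int) by omega, show (4:Int) ≤ n by omega, show ¬ n < (6:Int) by omega, show (6:Int) ≤ n by omega, show ¬ n < (12:Int) by omega, show (12:Int) ≤ n by omega, show n < (24:Int) by omega, show ¬ (24:Int) ≤ n by omega, show n < (36:Int) by omega, show ¬ (36:Int) ≤ n by omega, show n < (48:Int) by omega, show ¬ (48:Int) ≤ n by omega, show n < (60:Int) by omega, show ¬ (60:Int) ≤ n by omega, show n < (120:Int) by omega, show ¬ (120:Int) ≤ n by omega, show n < (180:Int) by omega, show ¬ (180:Int) ≤ n by omega, show n < (240:Int) by omega, show ¬ (240:Int) ≤ n by omega]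
  by_cases h36 : n < 36
  · simp [pvBisectRight, pvHCN, List.find?, show ¬ n < (1:Int) by omega, show (1:Int) ≤ n by omega, show ¬ n < (2:Int) by omega, show (2:Int) ≤ n by omega, show ¬ n < (4:Int) by omega, show (4:Int) ≤ n by omega, show ¬ n < (6:Int) by omega, show (6:Int) ≤ n by omega, show ¬ n < (12:Int) by omega, show (12:Int) ≤ n by omega, show ¬ n < (24:Int) by omega, show (24:Int) ≤ n by omega, show n < (36:Int) by omega, show ¬ (36:Int) ≤ n by omega, show n < (48:Int) by omega, show ¬ (48:Int) ≤ n by omega, show n < (60:Int) by omega, show ¬ (60:Int) ≤ n by omega, show n < (120:Int) by omega, show ¬ (120:Int) ≤ n by omega, show n < (180:Int) by omega, show ¬ (180:Int) ≤ n by omega, show n < (240:Int) by omega, show ¬ (240:Int) ≤ n by omega]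
  by_cases h48 : n < 48
  · simp [pvBisectRight, pvHCN, List.find?, show ¬ n < (1:Int) by omega, show (1:Int) ≤ n by omega, show ¬ n < (2:Int) by omega, show (2:Int) ≤ n by omega, show ¬ n < (4:Int) by omega, show (4:Int) ≤ n by omega, show ¬ n < (6:Int) by omega, show (6:Int) ≤ n by omega, show ¬ n < (12:Int) by omega, show (12:Int) ≤ n by omega, show ¬ n < (24:Int) by omega, show (24:Int) ≤ n by omega, show ¬ n < (36:Int) by omega, show (36:Int) ≤ n by omega, show n < (48:Int) by omega, show ¬ (48:Int) ≤ n by omega, show n < (60:Int) by omega, show ¬ (60:Int) ≤ n by omega, show n < (120:Int) by omega, show ¬ (120:Int) ≤ n by omega, show n < (180:Int) by omega, show ¬ (180:Int) ≤ n by omega, show n < (240:Int) by omega, show ¬ (240:Int) ≤ n by omega]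
  by_cases h60 : n < 60
  · simp [pvBisectRight, pvHCN, List.find?, show ¬ n < (1:Int) by omega, show (1:Int) ≤ n by omega, show ¬ n < (2:Int) by omega, show (2:Int) ≤ n by omega, show ¬ n < (4:Int) by omega, show (4:Int) ≤ n by omega, show ¬ n < (6:Int) by omega, show (6:Int) ≤ n by omega, show ¬ n < (12:Int) by omega, show (12:Int) ≤ n by omega, show ¬ n < (24:Int) by omega, show (24:Int) ≤ n by omega, show ¬ n < (36:Int) by omega, show (36:Int) ≤ n by omega, show ¬ n < (48:Int) by omega, show (48:Int) ≤ n by omega, show n < (60:Int) by omega, show ¬ (60:Int) ≤ n by omega, show n < (120:Int) by omega, show ¬ (120:Int) ≤ n by omega, show n < (180:Int) by omega, show ¬ (180:Int) ≤ n by omega, show n < (240:Int) by omega, show ¬ (240:Int) ≤ n by omega]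
  by_cases h120 : n < 120
  · simp [pvBisectRight, pvHCN, List.find?, show ¬ n < (1:Int) by omega, show (1:Int) ≤ n by omega, show ¬ n < (2:Int) by omega, show (2:Int) ≤ n by omega, show ¬ n < (4:Int) by omega, show (4:Int) ≤ n by omega, show ¬ n < (6:Int) by omega, show (6:Int) ≤ n by omega, show ¬ n < (12:Int) by omega, show (12:Int) ≤ n by omega, show ¬ n < (24:Int) by omega, show (24:Int) ≤ n by omega, show ¬ n < (36:Int) by omega, show (36:Int) ≤ n by omega, show ¬ n < (48:Int) by omega, show (48:Int) ≤ n by omega, show ¬ n < (60:Int) by omega, show (60:Int) ≤ n by omega, show n < (120:Int) by omega, show ¬ (120:Int) ≤ n by omega, show n < (180:Int) by omega, show ¬ (180:Int) ≤ n by omega, show n < (240:Int) by omega, show ¬ (240:Int) ≤ n by omega]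
  by_cases h180 : n < 180
  · simp [pvBisectRight, pvHCN, List.find?, show ¬ n < (1:Int) by omega, show (1:Int) ≤ n by omega, show ¬ n < (2:Int) by omega, show (2:Int) ≤ n by omega, show ¬ n < (4:Int) by omega, show (4:Int) ≤ n by omega, show ¬ n < (6:Int) by omega, show (6:Int) ≤ n by omega, show ¬ n < (12:Int) by omega, show (12:Int) ≤ n by omega, show ¬ n < (24:Int) by omega, show (24:Int) ≤ n by omega, show ¬ n < (36:Int) by omega, show (36:Int) ≤ n by omega, show ¬ n < (48:Int) by omega, show (48:Int) ≤ n by omega, show ¬ n < (60:Int) by omega, show (60:Int) ≤ n by omega, show ¬ n < (120:Int) by omega, show (120:Int) ≤ n by omega, show n < (180:Int) by omega, show ¬ (180:Int) ≤ n by omega, show n < (240:Int) by omega, show ¬ (240:Int) ≤ n by omega]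
  by_cases h240 : n < 240
  · simp [pvBisectRight, pvHCN, List.find?, show ¬ n < (1:Int) by omega, show (1:Int) ≤ n by omega, show ¬ n < (2:Int) by omega, show (2:Int) ≤ n by omega, show ¬ n < (4:Int) by omega, show (4:Int) ≤ n by omega, show ¬ n < (6:Int) by omega, show (6:Int) ≤ n by omega, show ¬ n < (12:Int) by omega, show (12:Int) ≤ n by omega, show ¬ n < (24:Int) by omega, show (24:Int) ≤ n by omega, show ¬ n < (36:Int) by omega, show (36:Int) ≤ n by omega, show ¬ n < (48:Int) by omega, show (48:Int) ≤ n by omega, show ¬ n < (60:Int) by omega, show (60:Int) ≤ n by omega, show ¬ n < (120:Int) by omega, show (120:Int) ≤ n by omega, show ¬ n < (180:Int) by omega, show (180:Int) ≤ n by omega, show n < (240:Int) by omega, show ¬ (240:Int) ≤ n by omega]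
  · simp [pvBisectRight, pvHCN, List.find?, show ¬ n < (1:Int) by omega, show (1:Int) ≤ n by omega, show ¬ n < (2:Int) by omega, show (2:Int) ≤ n by omega, show ¬ n < (4:Int) by omega, show (4:Int) ≤ n by omega, show ¬ n < (6:Int) by omega, show (6:Int) ≤ n by omega, show ¬ n < (12:Int) by omega, show (12:Int) ≤ n by omega, show ¬ n < (24:Int) by omega, show (24:Int) ≤ n by omega, show ¬ n < (36:Int) by omega, show (36:Int) ≤ n by omega, show ¬ n < (48:Int) by omega, show (48:Int) ≤ n by omega, show ¬ n < (60:Int) by omega, show (60:Int) ≤ n by omega, show ¬ n < (120:Int) by omega, show (120:Int) ≤ n by omega, show ¬ n < (180:Int) by omega, show (180:Int) ≤ n by omega, show ¬ n < (240:Int) by omega, show (240:Int) ≤ n by omega]
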